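-- pv_equiv track=rewrite | github.com/lilpuzeen/Algorithms-DiscreteMaths-S1-2 | Algorithms/Second&Third Lab/J.py | grasshooper
-- ===== SOURCE A (Python) =====
-- def grasshooper(n, k, coins):
-- 	dp = [0] * (n + 1)
-- 	dp[0] = 1
-- 	for i in range(1, n + 1):
-- 		for j in range(k):
-- 			if i - coins[j] >= 0:
-- 				dp[i] += dp[i - coins[j]]
-- 	return dp[n]
-- ===== SOURCE B (Python) =====
-- def grasshooper(n, k, coins):
--     # Demand-driven memoized DFS from the target: an explicit stack visits only
--     # positions reachable from n, post-order, caching ways(p) in a dict.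
--     sizes = [coins[j] for j in range(k)]
--     memo = {}
--     stack = [n]
--     while stack:
--         p = stack[-1]
--         if p in memo:
--             stack.pop()
--         elif p == 0:
--             memo[0] = 1
--             stack.pop()
--         else:
--             todo = [p - c for c in sizes if p - c >= 0 and p - c not in memo]
--             if todo:
--                 stack += todo
--             else:
--                 memo[p] = sum(memo[p - c] for c in sizes if p - c >= 0)
--                 stack.pop()
--     return memo[n]
-- ===== Notes on version B (the rewrite author's own statement) =====
-- stated objective: alternative
-- what changed: Replaces A's forward bottom-up array sweep dp[0..n] by a demand-driven memoized depth-first search from the target: an explicit stack visits only the positions reachable from n, in post-order (children before parent), caching ways(p) in a dict, and the answer is the cached ways(n).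
-- outside the precondition, e.g. on grasshooper(3, 2, [0, 1]): A returns 1, B does not finish within the time limit; on grasshooper(0, 8, [2, 1, -1]): A returns 1, B raises IndexError
import Mathlib
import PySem

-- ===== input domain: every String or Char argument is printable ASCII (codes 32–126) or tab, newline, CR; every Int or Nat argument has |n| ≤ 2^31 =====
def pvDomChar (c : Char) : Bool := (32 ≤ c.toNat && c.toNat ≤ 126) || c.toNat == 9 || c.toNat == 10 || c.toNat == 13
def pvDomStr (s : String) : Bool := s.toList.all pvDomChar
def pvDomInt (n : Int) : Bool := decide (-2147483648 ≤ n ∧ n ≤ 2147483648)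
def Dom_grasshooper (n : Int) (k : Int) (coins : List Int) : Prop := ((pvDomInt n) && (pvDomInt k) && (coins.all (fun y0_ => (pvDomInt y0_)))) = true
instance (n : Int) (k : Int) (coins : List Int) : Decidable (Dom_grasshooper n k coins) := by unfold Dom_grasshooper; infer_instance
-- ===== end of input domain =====

-- B replaces A's forward dp[0..n] array sweep by a demand-driven memoized depth-first
-- search from the target (explicit stack, post-order, ways cached in a dict) — an
-- alternative decomposition, equal on Pre_ since both compute the composition count.


-- ===== PORT A =====
-- dp indices are in range under Pre_ (0 ≤ i - coins[j] ≤ n, i ≤ n, 0 ≤ j < k ≤ len coins),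
-- so List.set/getD and pyGetD are exact there; outside Pre_ Python raises.
def grasshooper (n : Int) (k : Int) (coins : List Int) : Int :=
  let dp0 : List Int := (List.replicate (n + 1).toNat 0).set 0 1
  let dp := (PySem.List.pyRange 1 (n + 1) 1).foldl (fun dp i =>
    (PySem.List.pyRange 0 k 1).foldl (fun dp j =>
      if i - PySem.List.pyGetD coins j 0 ≥ 0 then
        dp.set i.toNat (dp.getD i.toNat 0 + dp.getD (i - PySem.List.pyGetD coins j 0).toNat 0)
      else dp) dp) dp0
  dp.getD n.toNat 0

-- ===== PORT B =====
-- The while loop of Source B: the stack is modelled head-as-top (Python's top is the list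
-- end, so 'stack += todo' pushes todo.reverse here); 'p in memo' is (memo.get? p).isSome;
-- the fuel argument is a totalization guard only — under Pre_ (jump sizes ≥ 1) the
-- supplied fuel is proved sufficient, so the loop always ends on an empty stack.
def pvBLoop (fuel : Nat) (sizes : List Int) (memo : PySem.Dict Int Int) (stack : List Int) : PySem.Dict Int Int :=
  match fuel, stack with
  | 0, _ => memo
  | _ + 1, [] => memo
  | fuel + 1, p :: rest =>
    if (memo.get? p).isSome then pvBLoop fuel sizes memo rest
    else if p = 0 then pvBLoop fuel sizes (memo.insert 0 1) rest
    else
      let todo := sizes.filterMap (fun c =>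
        if p - c ≥ 0 ∧ memo.get? (p - c) = none then some (p - c) else none)
      if todo ≠ [] then pvBLoop fuel sizes memo (todo.reverse ++ p :: rest)
      else pvBLoop fuel sizes
        (memo.insert p (sizes.foldl (fun acc c => if p - c ≥ 0 then acc + memo.getD (p - c) 0 else acc) 0)) rest

-- sizes = [coins[j] for j in range(k)] (pyGetD exact under Pre_); memo[n] at the end is
-- present under Pre_, so getD is exact there.
def grasshooper_alt (n : Int) (k : Int) (coins : List Int) : Int :=
  let sizes := (PySem.List.pyRange 0 k 1).map (fun j => PySem.List.pyGetD coins j 0)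
  let memo := pvBLoop ((sizes.length + 2) ^ (n.toNat + 1) + 1) sizes PySem.Dict.empty [n]
  memo.getD n 0

-- ===== PRECONDITION & SPEC =====
-- Pre_ excludes: n < 0 (A raises IndexError); 0 ≤ k > len(coins) (B's coins[j]
-- comprehension raises IndexError there even when n = 0, where A skips its loops and
-- returns 1; for n ≥ 1 A raises IndexError too); and, when n ≥ 1, a jump size ≤ 0
-- among the first k (a negative one makes A raise IndexError; a zero one makes A
-- return an order-dependent doubled partial sum while B's DFS does not terminate).
def Pre_grasshooper (n : Int) (k : Int) (coins : List Int) : Prop :=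
  0 ≤ n ∧ (k < 0 ∨ (0 ≤ k ∧ k ≤ (coins.length : Int) ∧ (n = 0 ∨ ∀ c ∈ coins.take k.toNat, 1 ≤ c)))
instance (n : Int) (k : Int) (coins : List Int) : Decidable (Pre_grasshooper n k coins) := by
  unfold Pre_grasshooper; infer_instance

def pvWitness_grasshooper : Int × Int × List Int := (5, 2, [1, 2])

def Spec_grasshooper (n : Int) (k : Int) (coins : List Int) (out : Int) : Prop := out = grasshooper_alt n k coins
instance (n : Int) (k : Int) (coins : List Int) (out : Int) : Decidable (Spec_grasshooper n k coins out) := by unfold Spec_grasshooper; infer_instance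

-- ===== CLAIM (what is proved, stated in full; the proofs are below) =====
def Claim_equal_grasshooper : Prop := ∀ (n : Int) (k : Int) (coins : List Int), Dom_grasshooper n k coins → Pre_grasshooper n k coins → Spec_grasshooper n k coins (grasshooper n k coins)

-- ===== LEMMAS AND PROOFS =====

-- Number of ordered compositions of m from the listed jump sizes (only sizes ≥ 1 count).
def pvW (sizes : List Int) (m : Nat) : Int :=
  if _hm : m = 0 then 1
  else sizes.foldl (fun acc c => if _hc : 1 ≤ c ∧ c ≤ (m : Int) then acc + pvW sizes (m - c.toNat) else acc) 0
termination_by m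
decreasing_by omega

theorem pvW_zero (sz : List Int) : pvW sz 0 = 1 := by simp [pvW]

theorem pvW_succ (sz : List Int) (m : Nat) (hm : m ≠ 0) :
    pvW sz m = (sz.map (fun c => if 1 ≤ c ∧ c ≤ (m : Int) then pvW sz (m - c.toNat) else 0)).sum := by
  rw [pvW]
  simp only [hm, dite_eq_ite]
  have h : (fun (acc : Int) (c : Int) => if 1 ≤ c ∧ c ≤ (m : Int) then acc + pvW sz (m - c.toNat) else acc)
      = fun acc c => acc + (if 1 ≤ c ∧ c ≤ (m : Int) then pvW sz (m - c.toNat) else 0) := by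
    funext acc c; split <;> simp
  rw [h, PySem.List.foldl_add]
  simp

-- ----- B side: the stack machine computes pvW -----

def pvCost (K m : Nat) : Nat := (K + 2) ^ (m + 1)

def pvInv (sz : List Int) (memo : PySem.Dict Int Int) : Prop :=
  ∀ q v, memo.get? q = some v → 0 ≤ q ∧ v = pvW sz q.toNat

theorem pvBLoop_nil (fuel : Nat) (sz : List Int) (memo : PySem.Dict Int Int) :
    pvBLoop fuel sz memo [] = memo := by cases fuel <;> simp [pvBLoop]

theorem pvBLoop_cons_eq (fuel : Nat) (sz : List Int) (memo : PySem.Dict Int Int) (p : Int) (rest : List Int) :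
    pvBLoop (fuel + 1) sz memo (p :: rest)
      = (if (memo.get? p).isSome then pvBLoop fuel sz memo rest
         else if p = 0 then pvBLoop fuel sz (memo.insert 0 1) rest
         else
           let todo := sz.filterMap (fun c =>
             if p - c ≥ 0 ∧ memo.get? (p - c) = none then some (p - c) else none)
           if todo ≠ [] then pvBLoop fuel sz memo (todo.reverse ++ p :: rest)
           else pvBLoop fuel sz
             (memo.insert p (sz.foldl (fun acc c => if p - c ≥ 0 then acc + memo.getD (p - c) 0 else acc) 0)) rest) := rfl

theorem pvBLoop_pop (fuel : Nat) (sz : List Int) (memo : PySem.Dict Int Int) (p : Int) (rest : List Int)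
    (h : (memo.get? p).isSome) :
    pvBLoop (fuel + 1) sz memo (p :: rest) = pvBLoop fuel sz memo rest := by
  rw [pvBLoop_cons_eq, if_pos h]

theorem pvBLoop_base (fuel : Nat) (sz : List Int) (memo : PySem.Dict Int Int) (rest : List Int)
    (h : memo.get? 0 = none) :
    pvBLoop (fuel + 1) sz memo (0 :: rest) = pvBLoop fuel sz (memo.insert 0 1) rest := by
  rw [pvBLoop_cons_eq, if_neg (by simp [h]), if_pos rfl]

theorem pvBLoop_push (fuel : Nat) (sz : List Int) (memo : PySem.Dict Int Int) (p : Int) (rest : List Int)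
    (h : memo.get? p = none) (h0 : ¬ p = 0)
    (ht : sz.filterMap (fun c => if p - c ≥ 0 ∧ memo.get? (p - c) = none then some (p - c) else none) ≠ []) :
    pvBLoop (fuel + 1) sz memo (p :: rest)
      = pvBLoop fuel sz memo
          ((sz.filterMap (fun c => if p - c ≥ 0 ∧ memo.get? (p - c) = none then some (p - c) else none)).reverse ++ p :: rest) := by
  rw [pvBLoop_cons_eq, if_neg (by simp [h]), if_neg h0]
  exact if_pos ht

theorem pvBLoop_memo (fuel : Nat) (sz : List Int) (memo : PySem.Dict Int Int) (p : Int) (rest : List Int)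
    (h : memo.get? p = none) (h0 : ¬ p = 0)
    (ht : sz.filterMap (fun c => if p - c ≥ 0 ∧ memo.get? (p - c) = none then some (p - c) else none) = []) :
    pvBLoop (fuel + 1) sz memo (p :: rest)
      = pvBLoop fuel sz
          (memo.insert p (sz.foldl (fun acc c => if p - c ≥ 0 then acc + memo.getD (p - c) 0 else acc) 0)) rest := by
  rw [pvBLoop_cons_eq, if_neg (by simp [h]), if_neg h0]
  exact if_neg (fun hne => hne ht)

-- When every feasible child is memoized, the memoized sum is pvW p.
theorem pvSumVal (sz : List Int) (hsz : ∀ c ∈ sz, 1 ≤ c) (p : Int) (hp : 0 < p)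
    (memo : PySem.Dict Int Int) (hInv : pvInv sz memo)
    (hall : ∀ c ∈ sz, p - c ≥ 0 → (memo.get? (p - c)).isSome) :
    sz.foldl (fun acc c => if p - c ≥ 0 then acc + memo.getD (p - c) 0 else acc) 0 = pvW sz p.toNat := by
  have hm : ((p.toNat : Nat) : Int) = p := by omega
  have hbody : ∀ (acc : Int) (c : Int), c ∈ sz →
      (if p - c ≥ 0 then acc + memo.getD (p - c) 0 else acc)
      = acc + (if 1 ≤ c ∧ c ≤ ((p.toNat : Nat) : Int) then pvW sz (p.toNat - c.toNat) else 0) := by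
    intro acc c hc
    have h1 := hsz c hc
    by_cases hle : p - c ≥ 0
    · obtain ⟨v, hv⟩ := Option.isSome_iff_exists.mp (hall c hc hle)
      have hiv := (hInv _ _ hv).2
      rw [if_pos hle, PySem.Dict.getD_eq_get?_getD, hv, Option.getD_some, if_pos ⟨h1, by omega⟩, hiv]
      congr 2
      omega
    · rw [if_neg hle, if_neg (by omega), add_zero]
  rw [PySem.List.foldl_congr_mem sz _ _ 0 hbody, PySem.List.foldl_add,
    pvW_succ sz p.toNat (by omega), zero_add]

def pvStepStmt (sz : List Int) (B : Nat) : Prop :=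
  ∀ (p : Int), 0 ≤ p → p.toNat < B →
  ∀ (fuel : Nat) (memo : PySem.Dict Int Int) (rest : List Int),
  pvInv sz memo → pvCost sz.length p.toNat ≤ fuel →
  ∃ memo' fuel',
    pvBLoop fuel sz memo (p :: rest) = pvBLoop fuel' sz memo' rest ∧
    pvInv sz memo' ∧
    (∀ q, (memo.get? q).isSome → (memo'.get? q).isSome) ∧
    (memo'.get? p).isSome ∧
    fuel - pvCost sz.length p.toNat ≤ fuel'

-- Process a whole pushed segment, given the one-element statement for smaller positions.
theorem pvList (sz : List Int) (B : Nat) (IH : pvStepStmt sz B) :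
    ∀ (l : List Int), (∀ q ∈ l, 0 ≤ q ∧ q.toNat < B) →
    ∀ (fuel : Nat) (memo : PySem.Dict Int Int) (rest : List Int),
    pvInv sz memo → (l.map (fun q => pvCost sz.length q.toNat)).sum ≤ fuel →
    ∃ memo' fuel',
      pvBLoop fuel sz memo (l ++ rest) = pvBLoop fuel' sz memo' rest ∧
      pvInv sz memo' ∧
      (∀ q, (memo.get? q).isSome → (memo'.get? q).isSome) ∧
      (∀ q ∈ l, (memo'.get? q).isSome) ∧
      fuel - (l.map (fun q => pvCost sz.length q.toNat)).sum ≤ fuel' := by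
  intro l
  induction l with
  | nil =>
    intro _ fuel memo rest hInv _
    exact ⟨memo, fuel, by simp, hInv, fun _ h => h, by simp, by simp⟩
  | cons q l ih =>
    intro hl fuel memo rest hInv hfuel
    obtain ⟨hq0, hqB⟩ := hl q List.mem_cons_self
    simp only [List.map_cons, List.sum_cons] at hfuel
    obtain ⟨memo₁, fuel₁, heq₁, hInv₁, hmono₁, hq₁, hf₁⟩ :=
      IH q hq0 hqB fuel memo (l ++ rest) hInv (by omega)
    obtain ⟨memo₂, fuel₂, heq₂, hInv₂, hmono₂, hl₂, hf₂⟩ :=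
      ih (fun r hr => hl r (List.mem_cons_of_mem q hr)) fuel₁ memo₁ rest hInv₁ (by omega)
    refine ⟨memo₂, fuel₂, ?_, hInv₂, fun r h => hmono₂ r (hmono₁ r h), ?_, ?_⟩
    · rw [List.cons_append, heq₁, heq₂]
    · intro r hr
      rcases List.mem_cons.mp hr with h | h
      · exact hmono₂ r (h ▸ hq₁)
      · exact hl₂ r h
    · simp only [List.map_cons, List.sum_cons]; omega

theorem pvStep (sz : List Int) (hsz : ∀ c ∈ sz, 1 ≤ c) : ∀ (B : Nat), pvStepStmt sz B := by
  intro B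
  induction B with
  | zero => intro p _ hpB; omega
  | succ B ih =>
    intro p hp0 hpB fuel memo rest hInv hfuel
    have hP1 : 1 ≤ (sz.length + 2) ^ p.toNat := Nat.one_le_pow _ _ (by omega)
    have hcost : pvCost sz.length p.toNat
        = sz.length * (sz.length + 2) ^ p.toNat + 2 * (sz.length + 2) ^ p.toNat := by
      rw [pvCost, pow_succ]; ring
    obtain ⟨f, rfl⟩ : ∃ f, fuel = f + 1 := ⟨fuel - 1, by rw [hcost] at hfuel; omega⟩
    by_cases h1 : (memo.get? p).isSome
    · refine ⟨memo, f, pvBLoop_pop f sz memo p rest h1, hInv, fun _ h => h, h1, by omega⟩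
    · have h1' : memo.get? p = none := Option.not_isSome_iff_eq_none.mp h1
      by_cases h0 : p = 0
      · subst h0
        refine ⟨memo.insert 0 1, f, pvBLoop_base f sz memo rest h1', ?_, ?_, ?_, by omega⟩
        · intro q v hv
          rw [PySem.Dict.get?_insert] at hv
          by_cases hq : q = 0
          · subst hq; simp at hv; exact ⟨le_refl _, by rw [← hv]; simp [pvW_zero]⟩
          · rw [if_neg hq] at hv; exact hInv q v hv
        · intro q h
          rw [PySem.Dict.get?_insert]
          by_cases hq : q = 0 <;> simp [hq, h]
        · simp [PySem.Dict.get?_insert_self]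
      · set todo := sz.filterMap (fun c =>
          if p - c ≥ 0 ∧ memo.get? (p - c) = none then some (p - c) else none) with htodo
        have htmem : ∀ q ∈ todo, 0 ≤ q ∧ q.toNat < p.toNat ∧ q.toNat < B := by
          intro q hq
          rw [htodo, List.mem_filterMap] at hq
          obtain ⟨c, hc, hcq⟩ := hq
          have h1c := hsz c hc
          by_cases hcond : p - c ≥ 0 ∧ memo.get? (p - c) = none
          · rw [if_pos hcond] at hcq
            obtain rfl : p - c = q := Option.some_injective _ hcq
            refine ⟨hcond.1, by omega, by omega⟩
          · rw [if_neg hcond] at hcq; exact absurd hcq (by simp)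
        by_cases ht : todo = []
        · -- every feasible child memoized: memoize p
          have hall : ∀ c ∈ sz, p - c ≥ 0 → (memo.get? (p - c)).isSome := by
            intro c hc hge
            by_cases h : memo.get? (p - c) = none
            · exfalso
              have hno : (if p - c ≥ 0 ∧ memo.get? (p - c) = none then some (p - c) else none) = none :=
                List.filterMap_eq_nil_iff.mp (htodo ▸ ht) c hc
              rw [if_pos ⟨hge, h⟩] at hno; cases hno
            · exact Option.isSome_iff_ne_none.mpr h
          have hval := pvSumVal sz hsz p (by omega) memo hInv hall
          refine ⟨memo.insert p _, f, pvBLoop_memo f sz memo p rest h1' h0 (htodo ▸ ht), ?_, ?_, ?_, by omega⟩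
          · intro q v hv
            rw [PySem.Dict.get?_insert] at hv
            by_cases hq : q = p
            · subst hq; rw [if_pos rfl] at hv
              exact ⟨hp0, by rw [← Option.some_injective _ hv, hval]⟩
            · rw [if_neg hq] at hv; exact hInv q v hv
          · intro q h
            rw [PySem.Dict.get?_insert]
            by_cases hq : q = p <;> simp [hq, h]
          · simp [PySem.Dict.get?_insert_self]
        · -- push the unmemoized children, process them, then resurface at p
          have hS : ((todo.reverse.map (fun q => pvCost sz.length q.toNat)).sum)
              ≤ sz.length * (sz.length + 2) ^ p.toNat := by
            have hbound : ∀ x ∈ todo.reverse.map (fun q => pvCost sz.length q.toNat),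
                x ≤ (sz.length + 2) ^ p.toNat := by
              intro x hx
              rw [List.mem_map] at hx
              obtain ⟨q, hq, rfl⟩ := hx
              obtain ⟨_, hlt, _⟩ := htmem q (List.mem_reverse.mp hq)
              calc pvCost sz.length q.toNat = (sz.length + 2) ^ (q.toNat + 1) := rfl
                _ ≤ (sz.length + 2) ^ p.toNat := Nat.pow_le_pow_right (by omega) (by omega)
            have h1 := List.sum_le_card_nsmul _ _ hbound
            have hlen : (todo.reverse.map (fun q => pvCost sz.length q.toNat)).length ≤ sz.length := by
              simp only [List.length_map, List.length_reverse]
              exact htodo ▸ List.length_filterMap_le _ _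
            simp only [smul_eq_mul] at h1
            calc (todo.reverse.map (fun q => pvCost sz.length q.toNat)).sum
                ≤ (todo.reverse.map (fun q => pvCost sz.length q.toNat)).length * (sz.length + 2) ^ p.toNat := h1
              _ ≤ sz.length * (sz.length + 2) ^ p.toNat := Nat.mul_le_mul_right _ hlen
          obtain ⟨memo₂, fuel₂, heq₂, hInv₂, hmono₂, hmem₂, hf₂⟩ :=
            pvList sz B ih todo.reverse
              (fun q hq => ⟨(htmem q (List.mem_reverse.mp hq)).1, (htmem q (List.mem_reverse.mp hq)).2.2⟩)
              f memo (p :: rest) hInv (by omega)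
          obtain ⟨f₂, rfl⟩ : ∃ f₂, fuel₂ = f₂ + 1 := ⟨fuel₂ - 1, by omega⟩
          have hstep1 : pvBLoop (f + 1) sz memo (p :: rest) = pvBLoop (f₂ + 1) sz memo₂ (p :: rest) := by
            rw [pvBLoop_push f sz memo p rest h1' h0 (htodo ▸ ht), ← htodo, heq₂]
          -- at resurfacing every feasible child of p is memoized in memo₂
          have hall₂ : ∀ c ∈ sz, p - c ≥ 0 → (memo₂.get? (p - c)).isSome := by
            intro c hc hge
            by_cases h : memo.get? (p - c) = none
            · refine hmem₂ (p - c) (List.mem_reverse.mpr ?_)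
              rw [htodo, List.mem_filterMap]
              exact ⟨c, hc, by rw [if_pos ⟨hge, h⟩]⟩
            · exact hmono₂ _ (Option.isSome_iff_ne_none.mpr h)
          by_cases h1₂ : (memo₂.get? p).isSome
          · refine ⟨memo₂, f₂, ?_, hInv₂, fun q h => hmono₂ q h, h1₂, by omega⟩
            rw [hstep1, pvBLoop_pop f₂ sz memo₂ p rest h1₂]
          · have h1₂' : memo₂.get? p = none := Option.not_isSome_iff_eq_none.mp h1₂
            have ht₂ : sz.filterMap (fun c =>
                if p - c ≥ 0 ∧ memo₂.get? (p - c) = none then some (p - c) else none) = [] := by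
              apply List.filterMap_eq_nil_iff.mpr
              intro c hc
              rw [if_neg]
              rintro ⟨hge, hnone⟩
              have hs := hall₂ c hc hge
              rw [hnone] at hs
              simp at hs
            have hval := pvSumVal sz hsz p (by omega) memo₂ hInv₂ hall₂
            refine ⟨memo₂.insert p (sz.foldl (fun acc c => if p - c ≥ 0 then acc + memo₂.getD (p - c) 0 else acc) 0), f₂, ?_, ?_, ?_, ?_, by omega⟩
            · rw [hstep1, pvBLoop_memo f₂ sz memo₂ p rest h1₂' h0 ht₂]
            · intro q v hv
              rw [PySem.Dict.get?_insert] at hv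
              by_cases hq : q = p
              · subst hq; rw [if_pos rfl] at hv
                exact ⟨hp0, by rw [← Option.some_injective _ hv, hval]⟩
              · rw [if_neg hq] at hv; exact hInv₂ q v hv
            · intro q h
              rw [PySem.Dict.get?_insert]
              by_cases hq : q = p <;> simp [hq, hmono₂ q h]
            · simp [PySem.Dict.get?_insert_self]

-- The whole B port computes pvW when all jump sizes are ≥ 1.
theorem pvAltVal (sz : List Int) (hsz : ∀ c ∈ sz, 1 ≤ c) (n : Int) (hn : 0 ≤ n) :
    (pvBLoop ((sz.length + 2) ^ (n.toNat + 1) + 1) sz PySem.Dict.empty [n]).getD n 0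
      = pvW sz n.toNat := by
  have hInv0 : pvInv sz PySem.Dict.empty := by
    intro q v hv; rw [PySem.Dict.get?_empty] at hv; cases hv
  obtain ⟨memo', fuel', heq, hInv', _, hsome, _⟩ :=
    pvStep sz hsz (n.toNat + 1) n hn (by omega)
      ((sz.length + 2) ^ (n.toNat + 1) + 1) PySem.Dict.empty [] hInv0 (by rw [pvCost]; omega)
  rw [heq, pvBLoop_nil]
  obtain ⟨v, hv⟩ := Option.isSome_iff_exists.mp hsome
  rw [PySem.Dict.getD_eq_get?_getD, hv, Option.getD_some, (hInv' n v hv).2]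

-- ----- A side (forward sweep computes pvW) -----

theorem pv_getD_set_self (l : List Int) (i : Nat) (h : i < l.length) (v : Int) : (l.set i v).getD i 0 = v := by
  simp [List.getD, h]

theorem pv_getD_set_ne (l : List Int) (i j : Nat) (h : j ≠ i) (v : Int) : (l.set i v).getD j 0 = l.getD j 0 := by
  simp only [List.getD, List.getElem?_set]
  rw [if_neg (fun e => h e.symm)]

theorem innerA (sz : List Int) (i : Int) (hi : 0 ≤ i) :
    ∀ (dp : List Int), (∀ c ∈ sz, 1 ≤ c) → i.toNat < dp.length → ∀ acc : Int, dp.getD i.toNat 0 = acc →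
    sz.foldl (fun dp c => if i - c ≥ 0 then dp.set i.toNat (dp.getD i.toNat 0 + dp.getD (i - c).toNat 0) else dp) dp
    = dp.set i.toNat (acc + (sz.map (fun c => if i - c ≥ 0 then dp.getD (i - c).toNat 0 else 0)).sum) := by
  induction sz with
  | nil =>
    intro dp _ hlen acc hacc
    simp only [List.foldl_nil, List.map_nil, List.sum_nil, add_zero]
    rw [← hacc]
    have h2 : dp.getD i.toNat 0 = dp[i.toNat] := by simp [List.getD, List.getElem?_eq_getElem hlen]
    rw [h2, List.set_getElem_self hlen]
  | cons c rest ih =>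
    intro dp hsz hlen acc hacc
    have hc1 : 1 ≤ c := hsz c List.mem_cons_self
    rw [List.foldl_cons, List.map_cons, List.sum_cons]
    by_cases hg : i - c ≥ 0
    · rw [if_pos hg, if_pos hg]
      set v := dp.getD (i - c).toNat 0 with hv
      have hlt : (i - c).toNat ≠ i.toNat := by omega
      have hlen1 : i.toNat < (dp.set i.toNat (dp.getD i.toNat 0 + v)).length := by
        simpa using hlen
      rw [ih (dp.set i.toNat (dp.getD i.toNat 0 + v)) (fun c' hc' => hsz c' (List.mem_cons_of_mem c hc'))
        hlen1 (acc + v) (by rw [pv_getD_set_self dp i.toNat hlen, hacc])]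
      rw [List.set_set]
      have hmap : List.map (fun c => if i - c ≥ 0 then (dp.set i.toNat (dp.getD i.toNat 0 + v)).getD (i - c).toNat 0 else 0) rest
          = List.map (fun c => if i - c ≥ 0 then dp.getD (i - c).toNat 0 else 0) rest := by
        apply List.map_congr_left
        intro c' hc'
        have hc'1 : 1 ≤ c' := hsz c' (List.mem_cons_of_mem c hc')
        by_cases hg' : i - c' ≥ 0
        · rw [if_pos hg', if_pos hg', pv_getD_set_ne dp i.toNat (i - c').toNat (by omega) _]
        · rw [if_neg hg', if_neg hg']
      rw [hmap, add_assoc]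
    · rw [if_neg hg, if_neg hg, zero_add]
      exact ih dp (fun c' hc' => hsz c' (List.mem_cons_of_mem c hc')) hlen acc hacc

theorem outerA (sz : List Int) (hsz : ∀ c ∈ sz, 1 ≤ c) (N : Nat) :
    ∀ m : Nat, m ≤ N →
    (((PySem.List.pyRange 1 ((m : Int) + 1) 1).foldl
        (fun dp i => sz.foldl (fun dp c => if i - c ≥ 0 then dp.set i.toNat (dp.getD i.toNat 0 + dp.getD (i - c).toNat 0) else dp) dp)
        ((List.replicate (N + 1) (0 : Int)).set 0 1)).length = N + 1
    ∧ ∀ t : Nat, t ≤ N →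
      ((PySem.List.pyRange 1 ((m : Int) + 1) 1).foldl
        (fun dp i => sz.foldl (fun dp c => if i - c ≥ 0 then dp.set i.toNat (dp.getD i.toNat 0 + dp.getD (i - c).toNat 0) else dp) dp)
        ((List.replicate (N + 1) (0 : Int)).set 0 1)).getD t 0 = if t ≤ m then pvW sz t else 0) := by
  intro m
  induction m with
  | zero =>
    intro _
    rw [show (((0 : Nat) : Int) + 1) = 1 by norm_num, PySem.List.pyRange_one_eq_nil (by norm_num), List.foldl_nil]
    constructor
    · simp
    · intro t ht
      by_cases h0 : t = 0
      · subst h0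
        rw [pv_getD_set_self _ 0 (by simp), if_pos (by omega), pvW_zero]
      · rw [pv_getD_set_ne _ 0 t h0, if_neg (by omega)]
        simp [List.getD]
  | succ m ih =>
    intro hm1
    obtain ⟨ihlen, ihval⟩ := ih (by omega)
    have e : (((m + 1 : Nat) : Int) + 1) = ((m : Int) + 1) + 1 := by push_cast; ring
    rw [e, PySem.List.pyRange_one_succ_right (by omega), List.foldl_append, List.foldl_cons, List.foldl_nil]
    have hti : ((m : Int) + 1).toNat = m + 1 := by omega
    have hlen2 : ((m : Int) + 1).toNat < (((PySem.List.pyRange 1 ((m : Int) + 1) 1).foldl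
        (fun dp i => sz.foldl (fun dp c => if i - c ≥ 0 then dp.set i.toNat (dp.getD i.toNat 0 + dp.getD (i - c).toNat 0) else dp) dp)
        ((List.replicate (N + 1) (0 : Int)).set 0 1))).length := by
      rw [ihlen, hti]; omega
    rw [innerA sz ((m : Int) + 1) (by omega) _ hsz hlen2 0 (by rw [hti]; rw [ihval (m + 1) (by omega)]; simp)]
    constructor
    · rw [List.length_set, ihlen]
    · intro t ht
      by_cases he : t = m + 1
      · subst he
        rw [hti, pv_getD_set_self _ _ (by rw [ihlen]; omega), if_pos (le_refl _), zero_add]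
        rw [pvW_succ sz (m + 1) (by omega)]
        apply congrArg
        apply List.map_congr_left
        intro c hc
        have hc1 : 1 ≤ c := hsz c hc
        by_cases hg : (m : Int) + 1 - c ≥ 0
        · rw [if_pos hg, if_pos (by refine ⟨hc1, ?_⟩; push_cast; omega)]
          rw [ihval (((m : Int) + 1 - c).toNat) (by omega), if_pos (by omega)]
          congr 1
          omega
        · rw [if_neg hg, if_neg (by push_cast; omega)]
      · rw [hti, pv_getD_set_ne _ _ t he, ihval t ht]
        by_cases h2 : t ≤ m
        · rw [if_pos h2, if_pos (by omega)]
        · rw [if_neg h2, if_neg (by omega)]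

theorem innerIdx {α : Type} (coins : List Int) (k : Int) (h0 : 0 ≤ k) (hk : k ≤ (coins.length : Int))
    (F : α → Int → α) (init : α) :
    (PySem.List.pyRange 0 k 1).foldl (fun s j => F s (PySem.List.pyGetD coins j 0)) init
    = (coins.take k.toNat).foldl F init := by
  have hlen : (((coins.take k.toNat).length : Nat) : Int) = k := by
    simp [List.length_take]; omega
  conv_lhs => rw [show k = (((coins.take k.toNat).length : Nat) : Int) from hlen.symm]
  rw [PySem.List.foldl_congr_mem _ _ (fun s j => F s (PySem.List.pyGetD (coins.take k.toNat) j 0)) init ?_]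
  · exact PySem.List.foldl_pyRange_zero_pyGetD' (coins.take k.toNat) 0 F init
  · intro acc j hj
    rw [PySem.List.mem_pyRange_one] at hj
    congr 1
    rw [PySem.List.pyGetD_eq_getElem coins 0 hj.1 (by omega),
      PySem.List.pyGetD_eq_getElem (coins.take k.toNat) 0 hj.1 hj.2,
      List.getElem_take]

theorem takeIdx (coins : List Int) (k : Int) (h0 : 0 ≤ k) (hk : k ≤ (coins.length : Int)) :
    (PySem.List.pyRange 0 k 1).map (fun j => PySem.List.pyGetD coins j 0) = coins.take k.toNat := by
  have hlen : (((coins.take k.toNat).length : Nat) : Int) = k := by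
    simp [List.length_take]; omega
  conv_lhs => rw [show k = (((coins.take k.toNat).length : Nat) : Int) from hlen.symm]
  rw [List.map_congr_left (g := fun j => PySem.List.pyGetD (coins.take k.toNat) j 0) ?_]
  · exact PySem.List.map_pyGetD_pyRange_zero' (coins.take k.toNat) 0
  · intro j hj
    rw [PySem.List.mem_pyRange_one] at hj
    show PySem.List.pyGetD coins j 0 = PySem.List.pyGetD (coins.take k.toNat) j 0
    rw [PySem.List.pyGetD_eq_getElem coins 0 hj.1 (by omega),
      PySem.List.pyGetD_eq_getElem (coins.take k.toNat) 0 hj.1 hj.2,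
      List.getElem_take]

theorem grasshooper_spec : Claim_equal_grasshooper := by
  intro n k coins _ hpre
  unfold Spec_grasshooper
  obtain ⟨hn, hcase⟩ := hpre
  rcases hcase with hkneg | ⟨hk0, hkl, hrest⟩
  · -- k < 0: range(k) is empty in A and B builds no jump sizes; both count with sz = []
    have hA : grasshooper n k coins = pvW ([] : List Int) n.toNat := by
      simp only [grasshooper]
      rw [PySem.List.pyRange_one_eq_nil (a := 0) (b := k) (by omega)]
      simp only [List.foldl_nil]
      rw [show n = ((n.toNat : Nat) : Int) from (Int.toNat_of_nonneg hn).symm]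
      rw [show (((n.toNat : Nat) : Int) + 1).toNat = n.toNat + 1 by omega]
      have h := (outerA ([] : List Int) (by simp) n.toNat n.toNat le_rfl).2 n.toNat le_rfl
      simp only [List.foldl_nil, Int.toNat_natCast] at h ⊢
      rw [h, if_pos le_rfl]
    have hB : grasshooper_alt n k coins = pvW ([] : List Int) n.toNat := by
      simp only [grasshooper_alt]
      rw [PySem.List.pyRange_one_eq_nil (a := 0) (b := k) (by omega)]
      simp only [List.map_nil]
      exact pvAltVal [] (by simp) n hn
    rw [hA, hB]
  · rcases hrest with h0 | hall
    · -- n = 0: A's loops are empty (dp = [1]); B memoizes position 0 immediately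
      subst h0
      have hA : grasshooper 0 k coins = 1 := by
        simp only [grasshooper]
        rw [PySem.List.pyRange_one_eq_nil (a := 1) (b := 0 + 1) (by norm_num)]
        simp [List.foldl_nil]
      have hB : grasshooper_alt 0 k coins = 1 := by
        simp only [grasshooper_alt]
        set sz := (PySem.List.pyRange 0 k 1).map (fun j => PySem.List.pyGetD coins j 0) with hsz
        have hfz : (sz.length + 2) ^ ((0 : Int).toNat + 1) + 1 = (sz.length + 2) + 1 := by
          norm_num
        rw [hfz, pvBLoop_base (sz.length + 2) sz PySem.Dict.empty []
          (by rw [PySem.Dict.get?_empty]), pvBLoop_nil]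
        rw [PySem.Dict.getD_insert_self]
      rw [hA, hB]
    · -- general case: both equal pvW of the first k jump sizes
      have hA : grasshooper n k coins = pvW (coins.take k.toNat) n.toNat := by
        simp only [grasshooper]
        rw [PySem.List.foldl_congr_mem _ _
          (fun dp (i : Int) => (coins.take k.toNat).foldl
            (fun dp c => if i - c ≥ 0 then dp.set i.toNat (dp.getD i.toNat 0 + dp.getD (i - c).toNat 0) else dp) dp)
          _ (fun dp i _ => innerIdx coins k hk0 hkl
            (fun dp c => if i - c ≥ 0 then dp.set i.toNat (dp.getD i.toNat 0 + dp.getD (i - c).toNat 0) else dp) dp)]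
        rw [show n = ((n.toNat : Nat) : Int) from (Int.toNat_of_nonneg hn).symm]
        rw [show (((n.toNat : Nat) : Int) + 1).toNat = n.toNat + 1 by omega]
        have := (outerA (coins.take k.toNat) hall n.toNat n.toNat le_rfl).2 n.toNat le_rfl
        simp only [Int.toNat_natCast] at this ⊢
        rw [this, if_pos le_rfl]
      have hB : grasshooper_alt n k coins = pvW (coins.take k.toNat) n.toNat := by
        simp only [grasshooper_alt]
        rw [takeIdx coins k hk0 hkl]
        exact pvAltVal (coins.take k.toNat) hall n hn
      rw [hA, hB]
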